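-- pv_equiv track=rewrite | github.com/marisakaupert/algorithms | exercise_10.4-2_CLRS.py | edge_string
-- ===== SOURCE A (Python) =====
-- def edge_string( definition ):
-- 	""" Build a string according to edge specs """
-- 	last = 0
-- 	string_arr = []
-- 	for pair in definition:
--
-- 		string_arr.append(' '*(pair[1]-last-1))
-- 		if pair[0]=='L':
-- 			string_arr.append(' ')
-- 		else:
-- 			string_arr.append( '\\' )
-- 		string_arr.append( '_'*(pair[2]-pair[1]-1))
-- 		if pair[0]=='L':
-- 			string_arr.append( '/' )
-- 		else:
-- 			string_arr.append( ' ' )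
-- 		last = pair[2]
-- 	return ''.join( string_arr )
-- ===== SOURCE B (Python) =====
-- def edge_string(definition):
--     """ Build a string according to edge specs """
--     # Divide and conquer: the string for pairs[lo:hi] depends on the prefix only
--     # through the end coordinate of the preceding pair, so halves can be built
--     # independently and concatenated (recursion depth O(log n)).
--     def seg(pair, prev):
--         lead, trail = (' ', '/') if pair[0] == 'L' else ('\\', ' ')
--         return lead.rjust(pair[1] - prev) + trail.rjust(pair[2] - pair[1], '_')
--
--     def solve(lo, hi, prev):
--         if hi - lo == 1:
--             return seg(definition[lo], prev)
--         mid = (lo + hi) // 2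
--         return solve(lo, mid, prev) + solve(mid, hi, definition[mid - 1][2])
--
--     return solve(0, len(definition), 0) if definition else ''
-- ===== Notes on version B (the rewrite author's own statement) =====
-- stated objective: alternative
-- what changed: Replaces A's single left-to-right pass with a mutable `last` and four-piece appends by a divide-and-conquer construction: the string for a half only depends on the preceding pair's end coordinate, so each half is built independently (recursively) and concatenated, with per-pair segments expressed via str.rjust instead of explicit space/underscore multiplication.
import Mathlib
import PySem

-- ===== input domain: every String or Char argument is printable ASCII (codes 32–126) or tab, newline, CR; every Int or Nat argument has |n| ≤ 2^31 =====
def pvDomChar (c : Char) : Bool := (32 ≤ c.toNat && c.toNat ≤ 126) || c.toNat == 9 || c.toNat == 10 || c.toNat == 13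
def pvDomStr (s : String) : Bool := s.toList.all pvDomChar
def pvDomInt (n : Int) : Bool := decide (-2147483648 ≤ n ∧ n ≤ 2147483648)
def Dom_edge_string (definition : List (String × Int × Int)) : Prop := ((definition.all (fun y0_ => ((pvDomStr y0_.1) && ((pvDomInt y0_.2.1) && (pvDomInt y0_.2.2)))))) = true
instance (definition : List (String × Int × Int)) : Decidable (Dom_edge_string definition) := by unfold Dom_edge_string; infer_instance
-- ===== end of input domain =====

-- B builds the string by divide and conquer (halves joined, a half depending on the
-- prefix only through the preceding end coordinate) instead of A's left-to-right
-- accumulator loop; same cost (objective: alternative).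

-- ===== PORT A =====
-- one iteration of A's for-loop: state = (last, string_arr)
def edge_string_step (st : Int × List (List Char)) (pair : String × Int × Int) :
    Int × List (List Char) :=
  let arr := st.2 ++ [PySem.List.pyRepeat [' '] (pair.2.1 - st.1 - 1)]
  let arr := arr ++ [if pair.1 == "L" then [' '] else ['\\']]
  let arr := arr ++ [PySem.List.pyRepeat ['_'] (pair.2.2 - pair.2.1 - 1)]
  let arr := arr ++ [if pair.1 == "L" then ['/'] else [' ']]
  (pair.2.2, arr)

def edge_string (definition : List (String × Int × Int)) : String :=
  String.ofList (PySem.Chars.join [] (definition.foldl edge_string_step (0, [])).2)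

-- ===== PORT B =====
-- Source B's `seg(pair, prev)`; c.rjust(w, fill) on a one-char string is exactly
-- fill*(w-1) + c with negative widths clamped, which pyRepeat does.
def edge_string_seg (pair : String × Int × Int) (prev : Int) : List Char :=
  let lt : List Char × List Char :=
    if pair.1 == "L" then ([' '], ['/']) else (['\\'], [' '])
  (PySem.List.pyRepeat [' '] (pair.2.1 - prev - 1) ++ lt.1) ++
    (PySem.List.pyRepeat ['_'] (pair.2.2 - pair.2.1 - 1) ++ lt.2)

-- Source B's `solve(lo, hi, prev)`; Python only ever calls it with lo < hi and
-- hi ≤ len(definition), so getD's default and the final `else []` are unreachable.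
def edge_string_solve (d : List (String × Int × Int)) (lo hi : Nat) (prev : Int) :
    List Char :=
  if hi - lo = 1 then edge_string_seg (d.getD lo default) prev
  else if lo < hi then
    let mid := (lo + hi) / 2
    edge_string_solve d lo mid prev ++
      edge_string_solve d mid hi (d.getD (mid - 1) default).2.2
  else []
termination_by hi - lo
decreasing_by all_goals omega

def edge_string_alt (definition : List (String × Int × Int)) : String :=
  if definition = [] then ""
  else String.ofList (edge_string_solve definition 0 definition.length 0)

-- ===== PRECONDITION & SPEC =====
def Spec_edge_string (definition : List (String × Int × Int)) (out : String) : Prop :=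
  out = edge_string_alt definition
instance (definition : List (String × Int × Int)) (out : String) :
    Decidable (Spec_edge_string definition out) := by unfold Spec_edge_string; infer_instance

-- ===== CLAIM =====
def Claim_equal_edge_string : Prop :=
  ∀ (definition : List (String × Int × Int)),
    Dom_edge_string definition → Spec_edge_string definition (edge_string definition)

-- ===== LEMMAS AND PROOFS =====

theorem join_nil_flatten (l : List (List Char)) : PySem.Chars.join [] l = l.flatten := by
  simp only [PySem.Chars.join, List.intercalate]
  induction l with
  | nil => simp
  | cons a t ih => cases t <;> simp_all [List.intersperse]

-- linear reference semantics: segments in order, threading the end coordinate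
def edge_string_lin : List (String × Int × Int) → Int → List Char
  | [], _ => []
  | p :: t, prev => edge_string_seg p prev ++ edge_string_lin t p.2.2

-- end coordinate after a block (prev if the block is empty)
def edge_string_end (xs : List (String × Int × Int)) (prev : Int) : Int :=
  match xs.getLast? with
  | none => prev
  | some p => p.2.2

theorem end_cons (p : String × Int × Int) (t : List (String × Int × Int)) (prev : Int) :
    edge_string_end (p :: t) prev = edge_string_end t p.2.2 := by
  cases t with
  | nil => simp [edge_string_end]
  | cons b t' =>
      unfold edge_string_end
      rw [List.getLast?_cons_cons]
      cases hb : (b :: t').getLast? with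
      | none => simp [List.getLast?_eq_none_iff] at hb
      | some q => rfl

theorem lin_append (xs ys : List (String × Int × Int)) (prev : Int) :
    edge_string_lin (xs ++ ys) prev =
      edge_string_lin xs prev ++ edge_string_lin ys (edge_string_end xs prev) := by
  induction xs generalizing prev with
  | nil => simp [edge_string_lin, edge_string_end]
  | cons p t ih => simp [edge_string_lin, ih, end_cons]

-- A's loop invariant
theorem foldl_inv (defs : List (String × Int × Int)) (last : Int) (acc : List (List Char)) :
    (defs.foldl edge_string_step (last, acc)).2.flatten =
      acc.flatten ++ edge_string_lin defs last := by
  induction defs generalizing last acc with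
  | nil => simp [edge_string_lin]
  | cons p ds ih =>
      simp only [List.foldl_cons, edge_string_step, edge_string_lin]
      rw [ih]
      by_cases h : p.1 == "L" <;> simp [edge_string_seg, h]

-- B's divide and conquer computes the linear semantics of the slice d[lo:hi]
theorem solve_eq (d : List (String × Int × Int)) :
    ∀ n lo hi prev, hi - lo = n → lo < hi → hi ≤ d.length →
      edge_string_solve d lo hi prev = edge_string_lin ((d.drop lo).take (hi - lo)) prev := by
  intro n
  induction n using Nat.strong_induction_on with
  | _ n ih =>
    intro lo hi prev hn hlt hle
    rw [edge_string_solve]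
    by_cases h1 : hi - lo = 1
    · have hlo : lo < d.length := by omega
      have htake : (d.drop lo).take (hi - lo) = [d[lo]] := by
        rw [h1]
        rw [List.take_one, List.head?_drop]
        simp [List.getElem?_eq_getElem hlo]
      simp only [if_pos h1, htake, edge_string_lin, List.append_nil]
      congr 1
      simp [List.getD, List.getElem?_eq_getElem hlo]
    · have h2 : 2 ≤ hi - lo := by omega
      simp only [if_neg h1, if_pos hlt]
      rw [ih ((lo + hi) / 2 - lo) (by omega) lo ((lo + hi) / 2) prev rfl (by omega) (by omega),
          ih (hi - (lo + hi) / 2) (by omega) ((lo + hi) / 2) hi _ rfl (by omega) hle]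
      have hsplit : (d.drop lo).take (hi - lo) =
          (d.drop lo).take ((lo + hi) / 2 - lo) ++ (d.drop ((lo + hi) / 2)).take (hi - (lo + hi) / 2) := by
        have : hi - lo = ((lo + hi) / 2 - lo) + (hi - (lo + hi) / 2) := by omega
        rw [this, List.take_add, List.drop_drop]
        have harg : lo + ((lo + hi) / 2 - lo) = (lo + hi) / 2 := by omega
        rw [harg]
      rw [hsplit, lin_append]
      congr 2
      -- end of the left slice is d[(lo+hi)/2 - 1]
      have hmd : (lo + hi) / 2 - 1 < d.length := by omega
      have hlen : ((d.drop lo).take ((lo + hi) / 2 - lo)).length = (lo + hi) / 2 - lo := by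
        simp; omega
      have hget : ((d.drop lo).take ((lo + hi) / 2 - lo)).getLast? = some d[(lo + hi) / 2 - 1] := by
        rw [List.getLast?_eq_getElem?, hlen]
        rw [List.getElem?_take_of_lt (by omega), List.getElem?_drop]
        have : lo + ((lo + hi) / 2 - lo - 1) = (lo + hi) / 2 - 1 := by omega
        rw [this, List.getElem?_eq_getElem hmd]
      simp [edge_string_end, hget, List.getD, List.getElem?_eq_getElem hmd]

-- ===== VERDICT =====
theorem edge_string_spec : Claim_equal_edge_string := by
  intro d _
  unfold Spec_edge_string
  dsimp only [edge_string, edge_string_alt]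
  rw [join_nil_flatten, foldl_inv]
  cases d with
  | nil => simp [edge_string_lin]
  | cons p t =>
      rw [if_neg (by simp)]
      rw [solve_eq (p :: t) (p :: t).length 0 (p :: t).length 0 (by omega) (by simp) le_rfl]
      simp
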